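-- pv_equiv track=rewrite | github.com/Knigh11/WooCommerce-Tool | woo_be_api/app/core/feed/fetcher.py | parse_variation_attributes
-- ===== SOURCE A (Python) =====
-- from typing import List, Optional, Callable, Tuple, Dict, Any
--
-- def parse_variation_attributes(variation: dict) -> Tuple[Optional[str], Optional[str], Optional[str], Optional[str]]:
--     """
--     Parse variation attributes to extract size and color values and keys.
--
--     Returns: (size_value, color_value, size_key, color_key)
--     """
--     size_value = None
--     color_value = None
--     size_key = None
--     color_key = None
--
--     if not isinstance(variation, dict):
--         return size_value, color_value, size_key, color_key
--
--     for attr in variation.get('attributes', []) or []: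
--         if not isinstance(attr, dict):
--             continue
--         attr_name = attr.get('name', '')
--         attr_option = attr.get('option', '')
--
--         if not attr_name or not attr_option:
--             continue
--
--         attr_name_lower = attr_name.lower()
--         attr_name_clean = attr_name_lower
--         if attr_name_clean.startswith('attribute_'):
--             attr_name_clean = attr_name_clean[len('attribute_'):]
--
--         # Check for size
--         if attr_name_clean in ['size', 'pa_size'] and size_value is None:
--             size_value = attr_option
--             size_key = attr_name_lower
--
--         # Check for color
--         if attr_name_clean in ['color', 'pa_color'] and color_value is None:
--             color_value = attr_option
--             color_key = attr_name_lower
--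
--     return size_value, color_value, size_key, color_key
-- ===== SOURCE B (Python) =====
-- def _first_match(attrs, names):
--     """Return (option, lowered_name) for the first matching attribute, else (None, None)."""
--     for attr in attrs:
--         if not isinstance(attr, dict):
--             continue
--         name = attr.get('name', '')
--         option = attr.get('option', '')
--         if not name or not option:
--             continue
--         lowered = name.lower()
--         clean = lowered[len('attribute_'):] if lowered.startswith('attribute_') else lowered
--         if clean in names:
--             return option, lowered
--     return None, None
--
--
-- def parse_variation_attributes(variation):
--     if not isinstance(variation, dict):
--         return None, None, None, None
--     attrs = variation.get('attributes', []) or []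
--     size_value, size_key = _first_match(attrs, {'size', 'pa_size'})
--     color_value, color_key = _first_match(attrs, {'color', 'pa_color'})
--     return size_value, color_value, size_key, color_key
-- ===== Notes on version B (the rewrite author's own statement) =====
-- stated objective: simpler
-- what changed: Replaces A's single fused accumulation loop carrying four mutable slots with a shared helper _first_match(attrs, names) that returns the first matching (option, lowered_name) pair, called once for size and once for color.
import Mathlib
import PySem

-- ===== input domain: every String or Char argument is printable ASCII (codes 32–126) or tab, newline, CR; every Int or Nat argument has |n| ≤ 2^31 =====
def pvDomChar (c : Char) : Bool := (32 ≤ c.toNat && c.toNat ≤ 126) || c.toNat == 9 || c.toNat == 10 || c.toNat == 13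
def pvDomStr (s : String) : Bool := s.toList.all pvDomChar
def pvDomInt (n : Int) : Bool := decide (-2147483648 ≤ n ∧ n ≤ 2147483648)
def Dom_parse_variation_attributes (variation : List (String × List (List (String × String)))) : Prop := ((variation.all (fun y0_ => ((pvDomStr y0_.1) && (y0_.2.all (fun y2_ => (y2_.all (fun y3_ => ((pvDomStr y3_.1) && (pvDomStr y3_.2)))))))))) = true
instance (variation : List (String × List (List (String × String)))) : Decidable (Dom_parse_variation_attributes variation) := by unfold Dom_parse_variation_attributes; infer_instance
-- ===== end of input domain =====

-- B replaces A's fused four-slot accumulation loop with a shared first-match helper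
-- called once for size and once for color (objective: simpler).

-- ===== PORT A =====
-- one loop iteration of A's for-loop over the attribute dicts
def pvStepA (st : Option String × Option String × Option String × Option String)
    (attr : List (String × String)) :
    Option String × Option String × Option String × Option String :=
  match st with
  | (sv, cv, sk, ck) =>
    let name := (PySem.Dict.mk attr).getD "name" ""
    let opt := (PySem.Dict.mk attr).getD "option" ""
    if name = "" ∨ opt = "" then (sv, cv, sk, ck)
    else
      let lower := PySem.Str.lower name
      let clean := if PySem.Str.startswith lower "attribute_" then
          PySem.Str.slice lower (some 10) none else lower
      let sz := if (clean = "size" ∨ clean = "pa_size") ∧ sv = none then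
          (some opt, some lower) else (sv, sk)
      let co := if (clean = "color" ∨ clean = "pa_color") ∧ cv = none then
          (some opt, some lower) else (cv, ck)
      (sz.1, co.1, sz.2, co.2)

def parse_variation_attributes (variation : List (String × List (List (String × String)))) :
    Option String × Option String × Option String × Option String :=
  ((PySem.Dict.mk variation).getD "attributes" []).foldl pvStepA (none, none, none, none)

-- ===== PORT B =====
-- B's helper _first_match: first attribute whose cleaned name is in `names`
def pvFirstMatch (attrs : List (List (String × String))) (names : List String) :
    Option String × Option String :=
  match attrs with
  | [] => (none, none)
  | attr :: rest =>
    let name := (PySem.Dict.mk attr).getD "name" ""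
    let opt := (PySem.Dict.mk attr).getD "option" ""
    if name = "" ∨ opt = "" then pvFirstMatch rest names
    else
      let lower := PySem.Str.lower name
      let clean := if PySem.Str.startswith lower "attribute_" then
          PySem.Str.slice lower (some 10) none else lower
      if clean ∈ names then (some opt, some lower) else pvFirstMatch rest names

def parse_variation_attributes_alt (variation : List (String × List (List (String × String)))) :
    Option String × Option String × Option String × Option String :=
  let attrs := (PySem.Dict.mk variation).getD "attributes" []
  let sz := pvFirstMatch attrs ["size", "pa_size"]
  let co := pvFirstMatch attrs ["color", "pa_color"]
  (sz.1, co.1, sz.2, co.2)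

-- ===== PRECONDITION & SPEC =====
def Spec_parse_variation_attributes (variation : List (String × List (List (String × String)))) (out : Option String × Option String × Option String × Option String) : Prop := out = parse_variation_attributes_alt variation
instance (variation : List (String × List (List (String × String)))) (out : Option String × Option String × Option String × Option String) : Decidable (Spec_parse_variation_attributes variation out) := by unfold Spec_parse_variation_attributes; infer_instance

-- ===== CLAIM (what is proved, stated in full; the proofs are below) =====
def Claim_equal_parse_variation_attributes : Prop := ∀ (variation : List (String × List (List (String × String)))), Dom_parse_variation_attributes variation → Spec_parse_variation_attributes variation (parse_variation_attributes variation)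

-- ===== LEMMAS AND PROOFS =====

-- how A's per-alias slot pair relates to B's first-match pair
def pvComb (v k : Option String) (p : Option String × Option String) :
    Option String × Option String :=
  match v with
  | some _ => (v, k)
  | none => match p.1 with
    | some _ => p
    | none => (none, k)

theorem pvFoldEq (attrs : List (List (String × String)))
    (sv cv sk ck : Option String) :
    attrs.foldl pvStepA (sv, cv, sk, ck) =
      ((pvComb sv sk (pvFirstMatch attrs ["size", "pa_size"])).1,
       (pvComb cv ck (pvFirstMatch attrs ["color", "pa_color"])).1,
       (pvComb sv sk (pvFirstMatch attrs ["size", "pa_size"])).2,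
       (pvComb cv ck (pvFirstMatch attrs ["color", "pa_color"])).2) := by
  induction attrs generalizing sv cv sk ck with
  | nil =>
    cases sv <;> cases cv <;> simp [pvComb, pvFirstMatch]
  | cons attr rest ih =>
    simp only [List.foldl_cons, pvStepA, pvFirstMatch]
    by_cases hskip : (PySem.Dict.mk attr).getD "name" "" = "" ∨ (PySem.Dict.mk attr).getD "option" "" = ""
    · simp only [hskip, if_pos]
      exact ih sv cv sk ck
    · simp only [hskip, ite_false]
      set lower := PySem.Str.lower ((PySem.Dict.mk attr).getD "name" "") with hlow
      set clean := (if PySem.Str.startswith lower "attribute_" then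
          PySem.Str.slice lower (some 10) none else lower) with hclean
      by_cases hs : clean = "size" ∨ clean = "pa_size" <;>
        by_cases hc : clean = "color" ∨ clean = "pa_color" <;>
          cases sv <;> cases cv <;>
            simp [hs, hc, ih, pvComb, List.mem_cons]

-- pvFirstMatch returns either (none, none) or a pair of two `some`s
theorem pvFirstMatch_shape (attrs : List (List (String × String))) (names : List String) :
    pvFirstMatch attrs names = (none, none) ∨
      ∃ v k, pvFirstMatch attrs names = (some v, some k) := by
  induction attrs with
  | nil => left; rfl
  | cons attr rest ih =>
    simp only [pvFirstMatch]
    split_ifs <;> first | exact ih | exact Or.inr ⟨_, _, rfl⟩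

-- ===== VERDICT (by name: the statement is the Claim_ definition above) =====
theorem parse_variation_attributes_spec : Claim_equal_parse_variation_attributes := by
  intro variation _
  unfold Spec_parse_variation_attributes parse_variation_attributes parse_variation_attributes_alt
  rw [pvFoldEq]
  rcases pvFirstMatch_shape (({ items := variation } : PySem.Dict String (List (List (String × String)))).getD "attributes" []) ["size", "pa_size"] with hs | ⟨v, k, hs⟩ <;>
    rcases pvFirstMatch_shape (({ items := variation } : PySem.Dict String (List (List (String × String)))).getD "attributes" []) ["color", "pa_color"] with hc | ⟨v', k', hc⟩ <;>
      simp [PySem.Dict.getD] at hs hc ⊢ <;> simp [hs, hc, pvComb]
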